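-- pv_equiv track=rewrite | github.com/StegVerse/FREE-DOM | scripts/build_changelog.py | semver_kind
-- ===== SOURCE A (Python) =====
-- CORE_PIPELINE = {
--     "scripts/import_pending.py",
--     "scripts/update_timeline.py",
--     "scripts/search_agent.py",
--     "scripts/build_checklist.py",
-- }
--
-- def semver_kind(changed: list[str]) -> str:
--     for p in changed:
--         if p.startswith(".github/workflows/") or p in CORE_PIPELINE:
--             return "major"
--     for p in changed:
--         if p.startswith("scripts/") or p.startswith("data/sources/"):
--             return "minor"
--     return "patch"
-- ===== SOURCE B (Python) =====
-- CORE_PIPELINE = {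
--     "scripts/import_pending.py",
--     "scripts/update_timeline.py",
--     "scripts/search_agent.py",
--     "scripts/build_checklist.py",
-- }
--
-- def semver_kind(changed: list[str]) -> str:
--     saw_minor = False
--     for p in changed:
--         if p.startswith(".github/workflows/") or p in CORE_PIPELINE:
--             return "major"
--         if p.startswith("scripts/") or p.startswith("data/sources/"):
--             saw_minor = True
--     return "minor" if saw_minor else "patch"
-- ===== Notes on version B (the rewrite author's own statement) =====
-- stated objective: alternative
-- what changed: Replaced A's two sequential scans (one for major triggers, one for minor triggers) by a single pass that returns 'major' immediately and otherwise accumulates a saw_minor flag, deciding minor vs patch after the loop (same asymptotic cost).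
import Mathlib
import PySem

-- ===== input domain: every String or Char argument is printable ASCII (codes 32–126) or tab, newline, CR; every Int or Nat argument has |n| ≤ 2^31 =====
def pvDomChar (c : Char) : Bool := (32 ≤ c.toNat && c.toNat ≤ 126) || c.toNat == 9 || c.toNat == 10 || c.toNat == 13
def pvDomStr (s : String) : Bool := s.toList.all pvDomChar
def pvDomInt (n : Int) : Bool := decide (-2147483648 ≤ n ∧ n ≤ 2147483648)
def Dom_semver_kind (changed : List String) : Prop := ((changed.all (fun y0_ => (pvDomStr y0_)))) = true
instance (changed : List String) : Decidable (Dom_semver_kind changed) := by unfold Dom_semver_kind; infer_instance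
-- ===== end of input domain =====

-- B collapses A's two sequential scans into one pass with a saw_minor flag (objective: alternative decomposition; same asymptotic cost).


-- ===== PORT A =====
def CORE_PIPELINE : List String :=
  ["scripts/import_pending.py", "scripts/update_timeline.py",
   "scripts/search_agent.py", "scripts/build_checklist.py"]

-- first loop of A: early return "major"
def semverA_loop1 : List String → Option String
  | [] => none
  | p :: rest =>
    if PySem.Str.startswith p ".github/workflows/" || CORE_PIPELINE.contains p then
      some "major"
    else semverA_loop1 rest

-- second loop of A: early return "minor"
def semverA_loop2 : List String → Option String
  | [] => none
  | p :: rest =>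
    if PySem.Str.startswith p "scripts/" || PySem.Str.startswith p "data/sources/" then
      some "minor"
    else semverA_loop2 rest

def semver_kind (changed : List String) : String :=
  match semverA_loop1 changed with
  | some s => s
  | none =>
    match semverA_loop2 changed with
    | some s => s
    | none => "patch"

-- ===== PORT B =====
def semverB_loop : List String → Bool → String
  | [], sawMinor => if sawMinor then "minor" else "patch"
  | p :: rest, sawMinor =>
    if PySem.Str.startswith p ".github/workflows/" || CORE_PIPELINE.contains p then
      "major"
    else
      semverB_loop rest
        (sawMinor || (PySem.Str.startswith p "scripts/" || PySem.Str.startswith p "data/sources/"))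

def semver_kind_alt (changed : List String) : String :=
  semverB_loop changed false

-- ===== PRECONDITION & SPEC =====
def Spec_semver_kind (changed : List String) (out : String) : Prop := out = semver_kind_alt changed
instance (changed : List String) (out : String) : Decidable (Spec_semver_kind changed out) := by unfold Spec_semver_kind; infer_instance

-- ===== CLAIM (what is proved, stated in full; the proofs are below) =====
def Claim_equal_semver_kind : Prop := ∀ (changed : List String), Dom_semver_kind changed → Spec_semver_kind changed (semver_kind changed)

-- ===== LEMMAS AND PROOFS =====
-- B's single pass equals: A's first scan, then (flag beats) A's second scan.
theorem semverB_loop_eq (l : List String) :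
    ∀ sawMinor : Bool, semverB_loop l sawMinor =
      match semverA_loop1 l with
      | some s => s
      | none =>
        if sawMinor then "minor"
        else match semverA_loop2 l with
          | some s => s
          | none => "patch" := by
  induction l with
  | nil => intro saw; cases saw <;> simp [semverB_loop, semverA_loop1, semverA_loop2]
  | cons p rest ih =>
    intro saw
    simp only [semverB_loop, semverA_loop1, semverA_loop2, ih]
    split_ifs <;> simp_all <;> tauto
-- ===== VERDICT (by name: the statement is the Claim_ definition above) =====
theorem semver_kind_spec : Claim_equal_semver_kind := by
  intro changed _
  unfold Spec_semver_kind semver_kind semver_kind_alt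
  rw [semverB_loop_eq]
  simp
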